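-- pv_equiv track=rewrite | github.com/jonvag/HACK4-python-2 | hack_3.py | fn_hack_3
-- ===== SOURCE A (Python) =====
-- def fn_hack_3(palabra):
--
--     diccionario = {
--     "a": "@",
--     "e": "3",
--     "i": "¡",
--     "o": "0",
--     "u": "v"
--     }
--
--     tamano = len(palabra)
--     result = ''
--     vocal = 0   # indicador para saber si la v es un remplazo de la u o si es una v naturalmente
--     i=1
--     for x in palabra:
--         if x in ("a", "e", "i", "o" , "u"):
--             x = diccionario[x]
--             vocal = 1
--
--         if i == 1 or i == tamano and vocal == 0: # aqui aplicamos upper si es principio o final y si no es una vocal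
--             result = result + x.upper()
--         else:
--             result = result + x
--
--         i += 1
--         vocal = 0
--
--
--     return result
-- ===== SOURCE B (Python) =====
-- _TBL = str.maketrans("aeiou", "@3\u00a10v")
--
-- def fn_hack_3(palabra):
--     if not palabra:
--         return ''
--     if len(palabra) == 1:
--         return palabra.translate(_TBL).upper()
--     last = palabra[-1]
--     end = last.translate(_TBL) if last in "aeiou" else last.upper()
--     return palabra[0].translate(_TBL).upper() + palabra[1:-1].translate(_TBL) + end
-- ===== Notes on version B (the rewrite author's own statement) =====
-- stated objective: simpler
-- what changed: Replaces A's single indexed loop carrying a position counter, a per-iteration vowel flag and repeated string concatenation with a loop-free three-segment decomposition: the whole substitution is one str.translate table, and the string is split by slicing into first char (translated, uppercased), middle slice (translated), and last char (translated if a vowel, else uppercased), concatenated once.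
import Mathlib
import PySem

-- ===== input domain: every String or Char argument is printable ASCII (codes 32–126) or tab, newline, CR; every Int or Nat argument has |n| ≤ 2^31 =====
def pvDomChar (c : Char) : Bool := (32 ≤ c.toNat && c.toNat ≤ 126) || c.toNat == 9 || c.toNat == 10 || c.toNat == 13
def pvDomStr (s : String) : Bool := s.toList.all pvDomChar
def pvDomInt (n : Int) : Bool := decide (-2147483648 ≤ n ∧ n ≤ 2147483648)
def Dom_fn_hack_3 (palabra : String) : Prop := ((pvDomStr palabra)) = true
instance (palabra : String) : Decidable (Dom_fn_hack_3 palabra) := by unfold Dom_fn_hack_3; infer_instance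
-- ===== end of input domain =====

-- B replaces A's single indexed loop (position counter + vowel flag + concatenation)
-- with a loop-free three-segment decomposition: translate the first char / the middle
-- slice / the last char separately and concatenate; objective: simpler.

-- ===== PORT A =====
-- the dict 'diccionario' (char keys, char values; Python iterates the string char by char)
def pvDicc : PySem.Dict Char Char :=
  PySem.Dict.mk [('a', '@'), ('e', '3'), ('i', '¡'), ('o', '0'), ('u', 'v')]

-- the loop 'for x in palabra' with state (i, vocal reset each iteration, result);
-- x.upper() on a single char is PySem.Chars.upperChar (exact on ASCII; the substituted
-- chars '@','3','¡','0','v' behave the same under Python's upper and upperChar)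
def pvGoA (tamano : Nat) : Nat → List Char → List Char → List Char
  | _, acc, [] => acc
  | i, acc, c :: rest =>
      let p : Char × Nat :=
        if c ∈ ['a', 'e', 'i', 'o', 'u'] then (PySem.Dict.getD pvDicc c c, 1) else (c, 0)
      let acc' :=
        if i == 1 || (i == tamano && p.2 == 0) then acc ++ [PySem.Chars.upperChar p.1]
        else acc ++ [p.1]
      pvGoA tamano (i + 1) acc' rest

def fn_hack_3 (palabra : String) : String :=
  String.ofList (pvGoA palabra.toList.length 1 [] palabra.toList)

-- ===== PORT B =====
-- the translate table _TBL = str.maketrans("aeiou", "@3¡0v")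
def pvTbl : PySem.Dict Char Char :=
  PySem.Dict.mk [('a', '@'), ('e', '3'), ('i', '¡'), ('o', '0'), ('u', 'v')]

-- s.translate(_TBL): each char is replaced by its table entry (identity if absent)
def pvTranslate (l : List Char) : List Char :=
  l.map (fun c => PySem.Dict.getD pvTbl c c)

def fn_hack_3_alt (palabra : String) : String :=
  let l := palabra.toList
  if l = [] then ""
  else if l.length = 1 then
    -- palabra.translate(_TBL).upper()
    String.ofList ((pvTranslate l).map PySem.Chars.upperChar)
  else
    -- last = palabra[-1]
    let last := PySem.List.pyGetD l (-1) ' '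
    -- end = last.translate(_TBL) if last in "aeiou" else last.upper()
    let endc : List Char :=
      if last ∈ "aeiou".toList then pvTranslate [last] else [PySem.Chars.upperChar last]
    -- palabra[0].translate(_TBL).upper() + palabra[1:-1].translate(_TBL) + end
    String.ofList
      ((pvTranslate [l.getD 0 ' ']).map PySem.Chars.upperChar
        ++ pvTranslate (PySem.List.slice l (some 1) (some (-1)))
        ++ endc)

-- ===== PRECONDITION & SPEC =====
def Spec_fn_hack_3 (palabra : String) (out : String) : Prop := out = fn_hack_3_alt palabra
instance (palabra : String) (out : String) : Decidable (Spec_fn_hack_3 palabra out) := by unfold Spec_fn_hack_3; infer_instance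

-- ===== CLAIM (what is proved, stated in full; the proofs are below) =====
def Claim_equal_fn_hack_3 : Prop := ∀ (palabra : String), Dom_fn_hack_3 palabra → Spec_fn_hack_3 palabra (fn_hack_3 palabra)

-- ===== LEMMAS AND PROOFS =====

-- the per-char substitution both sides effectively apply
def pvF (c : Char) : Char := PySem.Dict.getD pvTbl c c

theorem pvDicc_eq_pvTbl : pvDicc = pvTbl := rfl

theorem pvGetD_not_vowel {c : Char} (h : c ∉ ['a', 'e', 'i', 'o', 'u']) :
    PySem.Dict.getD pvTbl c c = c := by
  simp only [List.mem_cons, List.not_mem_nil, or_false, not_or] at h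
  obtain ⟨h1, h2, h3, h4, h5⟩ := h
  simp [pvTbl, PySem.Dict.getD, PySem.Dict.get?, beq_iff_eq,
    Ne.symm h1, Ne.symm h2, Ne.symm h3, Ne.symm h4, Ne.symm h5]

-- what A produces for the positions i = 2 .. tamano (the non-first positions)
def pvTailA : List Char → List Char
  | [] => []
  | [c] =>
      if c ∈ ['a', 'e', 'i', 'o', 'u'] then [pvF c] else [PySem.Chars.upperChar c]
  | c :: y :: rest => pvF c :: pvTailA (y :: rest)

theorem pvGoA_tail (tamano : Nat) :
    ∀ (l : List Char) (i : Nat) (acc : List Char), 2 ≤ i → i + l.length = tamano + 1 →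
      pvGoA tamano i acc l = acc ++ pvTailA l := by
  intro l
  induction l with
  | nil => intro i acc _ _; simp [pvGoA, pvTailA]
  | cons c rest ih =>
    intro i acc hi hlen
    have hne : (i == 1) = false := by simp; omega
    cases rest with
    | nil =>
      have hitam : (i == tamano) = true := by simp at hlen ⊢; omega
      by_cases hv : c ∈ ['a', 'e', 'i', 'o', 'u']
      · simp [pvGoA, pvTailA, hv, hne, hitam, pvF, pvDicc_eq_pvTbl]
      · simp [pvGoA, pvTailA, hv, hne, hitam]
    | cons y rs =>
      have hnet : (i == tamano) = false := by simp at hlen ⊢; omega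
      conv_lhs => rw [pvGoA]
      by_cases hv : c ∈ ['a', 'e', 'i', 'o', 'u']
      · simp only [hv, if_true, hne, hnet, Bool.false_and, Bool.or_self,
          if_neg Bool.false_ne_true]
        rw [ih (i + 1) _ (by omega) (by simp at hlen ⊢; omega)]
        simp [pvTailA, pvF, pvDicc_eq_pvTbl]
      · simp only [hv, if_false, hne, hnet, Bool.false_and, Bool.or_self,
          if_neg Bool.false_ne_true]
        rw [ih (i + 1) _ (by omega) (by simp at hlen ⊢; omega)]
        have hfc := pvGetD_not_vowel hv
        simp [pvTailA, pvF, hfc]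

-- pvTailA split into B's shape: translated middle ++ edge-treated last char
theorem pvTailA_split :
    ∀ (l : List Char) (h : l ≠ []),
      pvTailA l = l.dropLast.map pvF ++
        (if l.getLast h ∈ ['a', 'e', 'i', 'o', 'u'] then [pvF (l.getLast h)]
         else [PySem.Chars.upperChar (l.getLast h)]) := by
  intro l
  induction l with
  | nil => intro h; exact absurd rfl h
  | cons c rest ih =>
    intro h
    cases rest with
    | nil => simp [pvTailA]
    | cons y rs =>
      rw [List.getLast_cons (by simp)]
      simp only [pvTailA, List.dropLast_cons₂, List.map]
      rw [ih (by simp)]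
      simp

theorem aeiou_toList : "aeiou".toList = ['a', 'e', 'i', 'o', 'u'] := rfl

theorem slice_one_negone (c y : Char) (rs : List Char) :
    PySem.List.slice (c :: y :: rs) (some 1) (some (-1)) = (y :: rs).dropLast := by
  simp [PySem.List.slice, PySem.List.clampIdx, List.dropLast_eq_take]
  split_ifs <;> omega

theorem fn_hack_3_eq (palabra : String) : fn_hack_3 palabra = fn_hack_3_alt palabra := by
  unfold fn_hack_3 fn_hack_3_alt
  cases hl : palabra.toList with
  | nil => simp [pvGoA]
  | cons c rest =>
    simp only []
    have htr : pvTranslate = List.map pvF := rfl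
    cases hr : rest with
    | nil =>
      subst hr
      by_cases hv : c ∈ ['a', 'e', 'i', 'o', 'u']
      · simp [pvGoA, hv, htr, pvF, pvDicc_eq_pvTbl]
      · simp [pvGoA, hv, htr, pvF, pvGetD_not_vowel hv]
    | cons y rs =>
      subst hr
      have hstep : pvGoA (c :: y :: rs).length 1 [] (c :: y :: rs)
          = pvGoA (c :: y :: rs).length 2 [PySem.Chars.upperChar (pvF c)] (y :: rs) := by
        by_cases hv : c ∈ ['a', 'e', 'i', 'o', 'u']
        · simp [pvGoA, hv, pvF, pvDicc_eq_pvTbl]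
        · simp [pvGoA, hv, pvF, pvGetD_not_vowel hv]
      rw [hstep, pvGoA_tail _ _ 2 _ (by omega) (by simp; omega)]
      have hlast : PySem.List.pyGetD (c :: y :: rs) (-1) ' '
          = (c :: y :: rs).getLast (by simp) :=
        PySem.List.pyGetD_neg_one _ ' ' (by simp)
      rw [if_neg (show ¬(c :: y :: rs) = ([] : List Char) by simp),
        if_neg (show ¬(c :: y :: rs).length = 1 by simp)]
      rw [hlast, List.getLast_cons (show (y :: rs) ≠ [] by simp)]
      rw [aeiou_toList, slice_one_negone, htr]
      rw [pvTailA_split (y :: rs) (by simp)]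
      by_cases hv : (y :: rs).getLast (by simp) ∈ ['a', 'e', 'i', 'o', 'u']
      · simp [hv, pvF]
      · simp [hv, pvF]

-- ===== VERDICT (by name: the statement is the Claim_ definition above) =====
theorem fn_hack_3_spec : Claim_equal_fn_hack_3 := by
  intro palabra _
  unfold Spec_fn_hack_3
  exact fn_hack_3_eq palabra
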